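-- pv_equiv track=rewrite | github.com/UserNombre/coding | aoc2024/14-restroom-redoubt.py | compute_safety_score
-- ===== SOURCE A (Python) =====
-- from operator import mul
-- from functools import reduce
--
-- def compute_safety_score(bathroom_map, dimensions):
--     quadrant_score = [0]*4
--     for i in range(dimensions[0]):
--         for j in range(dimensions[1]):
--             quadrant = get_quadrant(i, j, dimensions)
--             if bathroom_map[i][j] and quadrant != -1:
--                 quadrant_score[quadrant] += bathroom_map[i][j]
--     safety_score = reduce(mul, quadrant_score)
--     return safety_score
--
-- def get_quadrant(i, j, dimensions):
--     if i < dimensions[0]//2: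
--         if j < dimensions[1]//2:
--             return 0
--         elif j > dimensions[1]//2:
--             return 1
--     elif i > dimensions[0]//2:
--         if j < dimensions[1]//2:
--             return 2
--         elif j > dimensions[1]//2:
--             return 3
--     return -1
-- ===== SOURCE B (Python) =====
-- def compute_safety_score(bathroom_map, dimensions):
--     mi = dimensions[0] // 2
--     mj = dimensions[1] // 2
--
--     def block(rlo, rhi, clo, chi):
--         return sum(bathroom_map[i][j]
--                    for i in range(rlo, rhi)
--                    for j in range(clo, chi))
--
--     q0 = block(0, mi, 0, mj)
--     q1 = block(0, mi, mj + 1, dimensions[1])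
--     q2 = block(mi + 1, dimensions[0], 0, mj)
--     q3 = block(mi + 1, dimensions[0], mj + 1, dimensions[1])
--     return q0 * q1 * q2 * q3
-- ===== Notes on version B (the rewrite author's own statement) =====
-- stated objective: simpler
-- what changed: Replaces the scan-and-classify-every-cell pass (per-cell quadrant lookup plus truthiness guard and an indexed score list) by four direct rectangular block sums over the quadrant ranges, multiplied together.
import Mathlib
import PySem

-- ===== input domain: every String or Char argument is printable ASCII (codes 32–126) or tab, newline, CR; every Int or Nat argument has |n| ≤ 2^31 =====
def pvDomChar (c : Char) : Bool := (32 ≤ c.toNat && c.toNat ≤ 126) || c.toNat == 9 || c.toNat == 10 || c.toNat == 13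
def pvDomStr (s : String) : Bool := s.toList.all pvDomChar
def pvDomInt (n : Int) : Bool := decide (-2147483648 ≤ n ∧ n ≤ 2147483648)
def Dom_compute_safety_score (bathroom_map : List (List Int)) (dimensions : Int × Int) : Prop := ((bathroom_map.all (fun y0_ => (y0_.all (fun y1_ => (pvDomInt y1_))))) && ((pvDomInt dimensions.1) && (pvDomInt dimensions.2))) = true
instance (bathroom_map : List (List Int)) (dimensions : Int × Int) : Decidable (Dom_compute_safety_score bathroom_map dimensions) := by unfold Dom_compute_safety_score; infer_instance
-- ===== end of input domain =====

-- B replaces A's scan-and-classify-every-cell loop by four rectangular block sums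
-- (one per quadrant) multiplied together; objective: simpler.

-- ===== PORT A =====
def get_quadrant (i j : Int) (dimensions : Int × Int) : Int :=
  if i < PySem.Int.floordiv dimensions.1 2 then
    if j < PySem.Int.floordiv dimensions.2 2 then 0
    else if j > PySem.Int.floordiv dimensions.2 2 then 1
    else -1
  else if i > PySem.Int.floordiv dimensions.1 2 then
    if j < PySem.Int.floordiv dimensions.2 2 then 2
    else if j > PySem.Int.floordiv dimensions.2 2 then 3
    else -1
  else -1

-- body of A's inner 'for j' loop (quadrant_score[quadrant] is only indexed with
-- quadrant ∈ {0,1,2,3}, guarded by 'quadrant != -1', so pySetD/pyGetD are exact here)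
def pvInnerStep (bathroom_map : List (List Int)) (dimensions : Int × Int) (i : Int)
    (qs : List Int) (j : Int) : List Int :=
  let quadrant := get_quadrant i j dimensions
  let v := PySem.List.pyGetD (PySem.List.pyGetD bathroom_map i []) j 0
  if v ≠ 0 ∧ quadrant ≠ -1 then
    PySem.List.pySetD qs quadrant (PySem.List.pyGetD qs quadrant 0 + v)
  else qs

def compute_safety_score (bathroom_map : List (List Int)) (dimensions : Int × Int) : Int :=
  let qs := (PySem.List.pyRange 0 dimensions.1 1).foldl
    (fun qs i => (PySem.List.pyRange 0 dimensions.2 1).foldl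
      (pvInnerStep bathroom_map dimensions i) qs) [0, 0, 0, 0]
  -- reduce(mul, quadrant_score): left fold of (*) over the list (never empty here)
  match qs with
  | [] => 0
  | h :: t => t.foldl (· * ·) h

-- ===== PORT B =====
def pvRowSum (bathroom_map : List (List Int)) (i clo chi : Int) : Int :=
  ((PySem.List.pyRange clo chi 1).map
    (fun j => PySem.List.pyGetD (PySem.List.pyGetD bathroom_map i []) j 0)).sum

def pvBlock (bathroom_map : List (List Int)) (rlo rhi clo chi : Int) : Int :=
  ((PySem.List.pyRange rlo rhi 1).map (fun i => pvRowSum bathroom_map i clo chi)).sum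

def compute_safety_score_alt (bathroom_map : List (List Int)) (dimensions : Int × Int) : Int :=
  let mi := PySem.Int.floordiv dimensions.1 2
  let mj := PySem.Int.floordiv dimensions.2 2
  let q0 := pvBlock bathroom_map 0 mi 0 mj
  let q1 := pvBlock bathroom_map 0 mi (mj + 1) dimensions.2
  let q2 := pvBlock bathroom_map (mi + 1) dimensions.1 0 mj
  let q3 := pvBlock bathroom_map (mi + 1) dimensions.1 (mj + 1) dimensions.2
  q0 * q1 * q2 * q3

-- ===== PRECONDITION & SPEC =====
-- Pre_ excludes exactly the inputs on which Python A raises IndexError: both loop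
-- bounds positive but the map has fewer than dimensions[0] rows, or one of the first
-- dimensions[0] rows has fewer than dimensions[1] entries.
def Pre_compute_safety_score (bathroom_map : List (List Int)) (dimensions : Int × Int) : Prop :=
  dimensions.1 ≤ 0 ∨ dimensions.2 ≤ 0 ∨
    (dimensions.1 ≤ (bathroom_map.length : Int) ∧
     ∀ row ∈ bathroom_map.take dimensions.1.toNat, dimensions.2 ≤ (row.length : Int))
instance (bathroom_map : List (List Int)) (dimensions : Int × Int) : Decidable (Pre_compute_safety_score bathroom_map dimensions) := by unfold Pre_compute_safety_score; infer_instance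

def pvWitness_compute_safety_score : List (List Int) × (Int × Int) :=
  ([[1, 2, 3], [4, 5, 6], [7, 8, 9]], (3, 3))

def Spec_compute_safety_score (bathroom_map : List (List Int)) (dimensions : Int × Int) (out : Int) : Prop := out = compute_safety_score_alt bathroom_map dimensions
instance (bathroom_map : List (List Int)) (dimensions : Int × Int) (out : Int) : Decidable (Spec_compute_safety_score bathroom_map dimensions out) := by unfold Spec_compute_safety_score; infer_instance

-- ===== CLAIM (what is proved, stated in full; the proofs are below) =====
def Claim_equal_compute_safety_score : Prop := ∀ (bathroom_map : List (List Int)) (dimensions : Int × Int), Dom_compute_safety_score bathroom_map dimensions → Pre_compute_safety_score bathroom_map dimensions → Spec_compute_safety_score bathroom_map dimensions (compute_safety_score bathroom_map dimensions)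

-- ===== LEMMAS AND PROOFS =====

-- contribution of row i, over column list js, to quadrant k
def pvContrib (m : List (List Int)) (d : Int × Int) (i k : Int) (js : List Int) : Int :=
  (js.map (fun j => if get_quadrant i j d = k
    then PySem.List.pyGetD (PySem.List.pyGetD m i []) j 0 else 0)).sum

lemma quad_mem (i j : Int) (d : Int × Int) :
    get_quadrant i j d = -1 ∨ get_quadrant i j d = 0 ∨ get_quadrant i j d = 1 ∨
    get_quadrant i j d = 2 ∨ get_quadrant i j d = 3 := by
  unfold get_quadrant; split_ifs <;> simp

lemma inner_step_eq (m : List (List Int)) (d : Int × Int) (i j a b c e : Int) :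
    pvInnerStep m d i [a, b, c, e] j =
      [a + (if get_quadrant i j d = 0 then PySem.List.pyGetD (PySem.List.pyGetD m i []) j 0 else 0),
       b + (if get_quadrant i j d = 1 then PySem.List.pyGetD (PySem.List.pyGetD m i []) j 0 else 0),
       c + (if get_quadrant i j d = 2 then PySem.List.pyGetD (PySem.List.pyGetD m i []) j 0 else 0),
       e + (if get_quadrant i j d = 3 then PySem.List.pyGetD (PySem.List.pyGetD m i []) j 0 else 0)] := by
  unfold pvInnerStep
  set v := PySem.List.pyGetD (PySem.List.pyGetD m i []) j 0 with hvdef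
  by_cases hv : v = 0
  · rcases quad_mem i j d with h | h | h | h | h <;> simp [h, hv]
  · rcases quad_mem i j d with h | h | h | h | h <;>
      simp [h, hv, PySem.List.pySetD_of_nonneg, PySem.List.pyGetD_eq_getElem]

lemma inner_fold (m : List (List Int)) (d : Int × Int) (i : Int) (js : List Int) :
    ∀ a b c e : Int, js.foldl (pvInnerStep m d i) [a, b, c, e] =
      [a + pvContrib m d i 0 js, b + pvContrib m d i 1 js,
       c + pvContrib m d i 2 js, e + pvContrib m d i 3 js] := by
  induction js with
  | nil => intro a b c e; simp [pvContrib]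
  | cons j js ih =>
      intro a b c e
      simp only [List.foldl_cons, inner_step_eq, ih, pvContrib, List.map_cons, List.sum_cons]
      ring_nf

lemma outer_fold (m : List (List Int)) (d : Int × Int) (is : List Int) :
    ∀ a b c e : Int,
      is.foldl (fun qs i => (PySem.List.pyRange 0 d.2 1).foldl (pvInnerStep m d i) qs) [a, b, c, e] =
      [a + (is.map (fun i => pvContrib m d i 0 (PySem.List.pyRange 0 d.2 1))).sum,
       b + (is.map (fun i => pvContrib m d i 1 (PySem.List.pyRange 0 d.2 1))).sum,
       c + (is.map (fun i => pvContrib m d i 2 (PySem.List.pyRange 0 d.2 1))).sum,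
       e + (is.map (fun i => pvContrib m d i 3 (PySem.List.pyRange 0 d.2 1))).sum] := by
  induction is with
  | nil => intro a b c e; simp
  | cons i is ih =>
      intro a b c e
      simp only [List.foldl_cons, inner_fold, ih, List.map_cons, List.sum_cons]
      ring_nf

-- sum of an 'if x < t' filter over range(0,n) is the sum over range(0,t)
lemma sum_ite_lt (f : Int → Int) (t n : Int)
    (h : (0 ≤ t ∧ t ≤ n) ∨ (n ≤ 0 ∧ t ≤ 0)) :
    ((PySem.List.pyRange 0 n 1).map (fun x => if x < t then f x else 0)).sum =
    ((PySem.List.pyRange 0 t 1).map f).sum := by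
  rcases h with ⟨h0, h1⟩ | ⟨h0, h1⟩
  · rw [PySem.List.pyRange_one_append 0 t n h0 h1, List.map_append, List.sum_append]
    have e1 : (PySem.List.pyRange 0 t 1).map (fun x => if x < t then f x else 0) =
        (PySem.List.pyRange 0 t 1).map f := by
      apply List.map_congr_left
      intro x hx
      rw [PySem.List.mem_pyRange_one] at hx
      simp [hx.2]
    have e2 : (PySem.List.pyRange t n 1).map (fun x => if x < t then f x else 0) =
        (PySem.List.pyRange t n 1).map (fun _ => (0 : Int)) := by
      apply List.map_congr_left
      intro x hx
      rw [PySem.List.mem_pyRange_one] at hx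
      simp; omega
    rw [e1, e2]; simp
  · rw [PySem.List.pyRange_one_eq_nil h0, PySem.List.pyRange_one_eq_nil h1]; rfl

-- sum of an 'if t < x' filter over range(0,n) is the sum over range(t+1,n)
lemma sum_ite_gt (f : Int → Int) (t n : Int)
    (h : (0 ≤ t + 1 ∧ t + 1 ≤ n) ∨ (n ≤ 0 ∧ n ≤ t + 1)) :
    ((PySem.List.pyRange 0 n 1).map (fun x => if t < x then f x else 0)).sum =
    ((PySem.List.pyRange (t + 1) n 1).map f).sum := by
  rcases h with ⟨h0, h1⟩ | ⟨h0, h1⟩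
  · rw [PySem.List.pyRange_one_append 0 (t + 1) n h0 h1, List.map_append, List.sum_append]
    have e1 : (PySem.List.pyRange 0 (t + 1) 1).map (fun x => if t < x then f x else 0) =
        (PySem.List.pyRange 0 (t + 1) 1).map (fun _ => (0 : Int)) := by
      apply List.map_congr_left
      intro x hx
      rw [PySem.List.mem_pyRange_one] at hx
      simp; omega
    have e2 : (PySem.List.pyRange (t + 1) n 1).map (fun x => if t < x then f x else 0) =
        (PySem.List.pyRange (t + 1) n 1).map f := by
      apply List.map_congr_left
      intro x hx
      rw [PySem.List.mem_pyRange_one] at hx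
      simp; omega
    rw [e1, e2]; simp
  · rw [PySem.List.pyRange_one_eq_nil h1, PySem.List.pyRange_one_eq_nil (by omega : n ≤ 0)]; rfl

lemma contrib_eval (m : List (List Int)) (d : Int × Int) (i : Int) :
    pvContrib m d i 0 (PySem.List.pyRange 0 d.2 1) =
      (if i < PySem.Int.floordiv d.1 2 then pvRowSum m i 0 (PySem.Int.floordiv d.2 2) else 0) ∧
    pvContrib m d i 1 (PySem.List.pyRange 0 d.2 1) =
      (if i < PySem.Int.floordiv d.1 2 then pvRowSum m i (PySem.Int.floordiv d.2 2 + 1) d.2 else 0) ∧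
    pvContrib m d i 2 (PySem.List.pyRange 0 d.2 1) =
      (if PySem.Int.floordiv d.1 2 < i then pvRowSum m i 0 (PySem.Int.floordiv d.2 2) else 0) ∧
    pvContrib m d i 3 (PySem.List.pyRange 0 d.2 1) =
      (if PySem.Int.floordiv d.1 2 < i then pvRowSum m i (PySem.Int.floordiv d.2 2 + 1) d.2 else 0) := by
  have hmj : PySem.Int.floordiv d.2 2 = d.2 / 2 :=
    PySem.Int.floordiv_eq_ediv_of_pos (by norm_num)
  set mi := PySem.Int.floordiv d.1 2 with hmi
  set mj := PySem.Int.floordiv d.2 2 with hmjdef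
  have hlt : (0 ≤ mj ∧ mj ≤ d.2) ∨ (d.2 ≤ 0 ∧ mj ≤ 0) := by omega
  have hgt : (0 ≤ mj + 1 ∧ mj + 1 ≤ d.2) ∨ (d.2 ≤ 0 ∧ d.2 ≤ mj + 1) := by omega
  refine ⟨?_, ?_, ?_, ?_⟩ <;> by_cases hi : i < mi
  · have hq : ∀ j : Int, (if get_quadrant i j d = 0 then PySem.List.pyGetD (PySem.List.pyGetD m i []) j 0 else 0) =
        (if j < mj then PySem.List.pyGetD (PySem.List.pyGetD m i []) j 0 else 0) := by
      intro j; unfold get_quadrant; rw [← hmi, ← hmjdef]; split_ifs <;> first | rfl | omega | (exfalso; omega)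
    simp only [pvContrib, hq, hi, if_true, pvRowSum]
    exact sum_ite_lt _ mj d.2 hlt
  · have hq : ∀ j : Int, (if get_quadrant i j d = 0 then PySem.List.pyGetD (PySem.List.pyGetD m i []) j 0 else 0) = 0 := by
      intro j; unfold get_quadrant; rw [← hmi, ← hmjdef]; split_ifs <;> first | rfl | omega | (exfalso; omega)
    simp only [pvContrib, hq, hi, if_false]
    simp
  · have hq : ∀ j : Int, (if get_quadrant i j d = 1 then PySem.List.pyGetD (PySem.List.pyGetD m i []) j 0 else 0) =
        (if mj < j then PySem.List.pyGetD (PySem.List.pyGetD m i []) j 0 else 0) := by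
      intro j; unfold get_quadrant; rw [← hmi, ← hmjdef]; split_ifs <;> first | rfl | omega | (exfalso; omega)
    simp only [pvContrib, hq, hi, if_true, pvRowSum]
    exact sum_ite_gt _ mj d.2 hgt
  · have hq : ∀ j : Int, (if get_quadrant i j d = 1 then PySem.List.pyGetD (PySem.List.pyGetD m i []) j 0 else 0) = 0 := by
      intro j; unfold get_quadrant; rw [← hmi, ← hmjdef]; split_ifs <;> first | rfl | omega | (exfalso; omega)
    simp only [pvContrib, hq, hi, if_false]
    simp
  · have hq : ∀ j : Int, (if get_quadrant i j d = 2 then PySem.List.pyGetD (PySem.List.pyGetD m i []) j 0 else 0) = 0 := by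
      intro j; unfold get_quadrant; rw [← hmi, ← hmjdef]; split_ifs <;> first | rfl | omega | (exfalso; omega)
    have hni : ¬ mi < i := by omega
    simp only [pvContrib, hq, hni, if_false]
    simp
  · by_cases hmi2 : mi < i
    · have hq : ∀ j : Int, (if get_quadrant i j d = 2 then PySem.List.pyGetD (PySem.List.pyGetD m i []) j 0 else 0) =
          (if j < mj then PySem.List.pyGetD (PySem.List.pyGetD m i []) j 0 else 0) := by
        intro j; unfold get_quadrant; rw [← hmi, ← hmjdef]; split_ifs <;> first | rfl | omega | (exfalso; omega)
      simp only [pvContrib, hq, hmi2, if_true, pvRowSum]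
      exact sum_ite_lt _ mj d.2 hlt
    · have hq : ∀ j : Int, (if get_quadrant i j d = 2 then PySem.List.pyGetD (PySem.List.pyGetD m i []) j 0 else 0) = 0 := by
        intro j; unfold get_quadrant; rw [← hmi, ← hmjdef]; split_ifs <;> first | rfl | omega | (exfalso; omega)
      simp only [pvContrib, hq, hmi2, if_false]
      simp
  · have hq : ∀ j : Int, (if get_quadrant i j d = 3 then PySem.List.pyGetD (PySem.List.pyGetD m i []) j 0 else 0) = 0 := by
      intro j; unfold get_quadrant; rw [← hmi, ← hmjdef]; split_ifs <;> first | rfl | omega | (exfalso; omega)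
    have hni : ¬ mi < i := by omega
    simp only [pvContrib, hq, hni, if_false]
    simp
  · by_cases hmi2 : mi < i
    · have hq : ∀ j : Int, (if get_quadrant i j d = 3 then PySem.List.pyGetD (PySem.List.pyGetD m i []) j 0 else 0) =
          (if mj < j then PySem.List.pyGetD (PySem.List.pyGetD m i []) j 0 else 0) := by
        intro j; unfold get_quadrant; rw [← hmi, ← hmjdef]; split_ifs <;> first | rfl | omega | (exfalso; omega)
      simp only [pvContrib, hq, hmi2, if_true, pvRowSum]
      exact sum_ite_gt _ mj d.2 hgt
    · have hq : ∀ j : Int, (if get_quadrant i j d = 3 then PySem.List.pyGetD (PySem.List.pyGetD m i []) j 0 else 0) = 0 := by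
        intro j; unfold get_quadrant; rw [← hmi, ← hmjdef]; split_ifs <;> first | rfl | omega | (exfalso; omega)
      simp only [pvContrib, hq, hmi2, if_false]
      simp

lemma main_eq (m : List (List Int)) (d : Int × Int) :
    compute_safety_score m d = compute_safety_score_alt m d := by
  have hmi : PySem.Int.floordiv d.1 2 = d.1 / 2 :=
    PySem.Int.floordiv_eq_ediv_of_pos (by norm_num)
  simp only [compute_safety_score, compute_safety_score_alt]
  rw [outer_fold]
  have h0 : (PySem.List.pyRange 0 d.1 1).map
      (fun i => pvContrib m d i 0 (PySem.List.pyRange 0 d.2 1)) =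
      (PySem.List.pyRange 0 d.1 1).map
      (fun i => if i < PySem.Int.floordiv d.1 2
        then pvRowSum m i 0 (PySem.Int.floordiv d.2 2) else 0) := by
    apply List.map_congr_left; intro i _; exact (contrib_eval m d i).1
  have h1 : (PySem.List.pyRange 0 d.1 1).map
      (fun i => pvContrib m d i 1 (PySem.List.pyRange 0 d.2 1)) =
      (PySem.List.pyRange 0 d.1 1).map
      (fun i => if i < PySem.Int.floordiv d.1 2
        then pvRowSum m i (PySem.Int.floordiv d.2 2 + 1) d.2 else 0) := by
    apply List.map_congr_left; intro i _; exact (contrib_eval m d i).2.1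
  have h2 : (PySem.List.pyRange 0 d.1 1).map
      (fun i => pvContrib m d i 2 (PySem.List.pyRange 0 d.2 1)) =
      (PySem.List.pyRange 0 d.1 1).map
      (fun i => if PySem.Int.floordiv d.1 2 < i
        then pvRowSum m i 0 (PySem.Int.floordiv d.2 2) else 0) := by
    apply List.map_congr_left; intro i _; exact (contrib_eval m d i).2.2.1
  have h3 : (PySem.List.pyRange 0 d.1 1).map
      (fun i => pvContrib m d i 3 (PySem.List.pyRange 0 d.2 1)) =
      (PySem.List.pyRange 0 d.1 1).map
      (fun i => if PySem.Int.floordiv d.1 2 < i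
        then pvRowSum m i (PySem.Int.floordiv d.2 2 + 1) d.2 else 0) := by
    apply List.map_congr_left; intro i _; exact (contrib_eval m d i).2.2.2
  rw [h0, h1, h2, h3,
    sum_ite_lt _ _ _ (by omega),
    sum_ite_gt _ _ _ (by omega),
    sum_ite_lt _ _ _ (by omega),
    sum_ite_gt _ _ _ (by omega)]
  simp only [pvBlock, List.foldl_cons, List.foldl_nil]
  ring

theorem compute_safety_score_spec : Claim_equal_compute_safety_score := by
  intro m d _ _
  exact main_eq m d
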